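-- pv_equiv track=rewrite | github.com/Saroshmi/Mini-Projects-CCBP | Python Code/All Possible Subsets.py | all_uniq_combo
-- ===== SOURCE A (Python) =====
-- def all_uniq_combo(s,n):
--     s=sorted(s)
--     items=list(range(len(s)))
--     old_combo=[[]]
--     new_combo=[]
--     for i in range(n):
--         new_combo=[]
--         for j in old_combo:
--             for item in items:
--                 if(j and item > j[-1]) or len(j)==0:
--                     new_combo.append(j+[item])
--             old_combo=new_combo
--     word_combo=[]
--     for i in new_combo:
--         word_combo1=[]
--         for index in i:
--             word_combo1.append(s[index])
--         word_combo.append(tuple(word_combo1))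
--     return sorted(set(word_combo))
-- ===== SOURCE B (Python) =====
-- def all_uniq_combo(s, n):
--     if n < 0 or n > len(s):
--         return []
--     # layers[k] = all k-element combinations (as tuples) of the sorted prefix processed so far
--     layers = [[()]] + [[] for _ in range(n)]
--     for x in sorted(s):
--         layers = [layers[0]] + [cur + [c + (x,) for c in prev]
--                                 for prev, cur in zip(layers, layers[1:])]
--     return sorted(set(layers[n]))
-- ===== Notes on version B (the rewrite author's own statement) =====
-- stated objective: alternative
-- what changed: A grows increasing index tuples level by level, rescanning the whole index list for every partial combination and translating index tuples to words afterwards; B runs a suffix DP directly over the sorted words, zipping adjacent layers so each new combination is produced by one append with no inner scan and no index bookkeeping.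
-- intended difference: For n == 0 A returns [] although the empty tuple is the unique size-0 combination; B returns [()], which is the intended value. — e.g. on all_uniq_combo([], 0): A returns [], B returns [[]]
import Mathlib
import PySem

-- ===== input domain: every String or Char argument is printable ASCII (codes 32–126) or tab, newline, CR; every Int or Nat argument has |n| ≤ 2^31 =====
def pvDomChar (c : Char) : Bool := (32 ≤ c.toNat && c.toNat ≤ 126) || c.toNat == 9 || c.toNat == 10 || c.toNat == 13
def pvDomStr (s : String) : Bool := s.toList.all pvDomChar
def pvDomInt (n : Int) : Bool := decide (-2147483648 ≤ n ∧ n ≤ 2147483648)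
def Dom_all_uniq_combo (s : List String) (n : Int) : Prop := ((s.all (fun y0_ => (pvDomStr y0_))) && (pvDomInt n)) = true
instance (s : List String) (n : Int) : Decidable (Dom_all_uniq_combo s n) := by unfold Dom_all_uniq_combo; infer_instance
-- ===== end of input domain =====

-- B replaces A's level-by-level growing of increasing index tuples by a suffix DP over the
-- sorted words themselves (zip of adjacent layers), agreeing with A except at n = 0 (see D_).

-- ===== PORT A =====
-- A-side helper: one pass of A's "extend every combination by every larger index" level loop
def aLevel (items : List Int) (old : List (List Int)) : List (List Int) :=
  old.foldl (fun acc j =>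
    items.foldl (fun acc2 item =>
      if (decide (j ≠ []) && decide (PySem.List.pyGetD j (-1) 0 < item)) || (j.length == 0)
      then acc2 ++ [j ++ [item]] else acc2) acc) []

def all_uniq_combo (s : List String) (n : Int) : List (List String) :=
  let s2 := PySem.List.sorted s (fun x => x) false
  let items : List Int := PySem.List.pyRange 0 (s2.length : Int) 1
  -- the Python also re-assigns 'old_combo = new_combo' inside the j-loop; when old_combo is
  -- nonempty it thereby ends the level as new_combo, and when old_combo = [] the fresh
  -- new_combo is [] as well, so the pair update below is exact
  let st := (PySem.List.pyRange 0 n 1).foldl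
    (fun (st : List (List Int) × List (List Int)) _ =>
      let nc := aLevel items st.1; (nc, nc)) ([[]], [])
  let word_combo := st.2.foldl (fun acc i =>
      acc ++ [i.foldl (fun w idx => w ++ [PySem.List.pyGetD s2 idx ""]) []]) []
  PySem.List.sorted (PySem.Set.ofList word_combo) (fun x => x) false

-- ===== PORT B =====
-- B-side helper: one step of B's DP — layer k of (prefix ++ [x]) is layer k of the prefix
-- plus every layer-(k-1) combination with x appended
def bStep (x : String) (layers : List (List (List String))) : List (List (List String)) :=
  [PySem.List.pyGetD layers 0 []] ++
    (layers.zip layers.tail).map (fun pc => pc.2 ++ pc.1.map (fun c => c ++ [x]))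

def all_uniq_combo_alt (s : List String) (n : Int) : List (List String) :=
  if n < 0 ∨ (s.length : Int) < n then []
  else
    let layers := (PySem.List.sorted s (fun x => x) false).foldl
      (fun acc x => bStep x acc) ([[[]]] ++ List.replicate n.toNat [])
    PySem.List.sorted (PySem.Set.ofList (PySem.List.pyGetD layers n [])) (fun x => x) false

-- ===== PRECONDITION & SPEC =====
-- For n == 0 A returns [] although there is exactly one size-0 combination; B returns the
-- correct singleton [()] (here [[]]), which is the intended value.
def D_all_uniq_combo (s : List String) (n : Int) : Prop := n = 0
instance (s : List String) (n : Int) : Decidable (D_all_uniq_combo s n) := by unfold D_all_uniq_combo; infer_instance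

def Spec_all_uniq_combo (s : List String) (n : Int) (out : List (List String)) : Prop := ¬ D_all_uniq_combo s n → out = all_uniq_combo_alt s n
instance (s : List String) (n : Int) (out : List (List String)) : Decidable (Spec_all_uniq_combo s n out) := by unfold Spec_all_uniq_combo; infer_instance

def pvDiffWitness_all_uniq_combo : List String × Int := ([], 0)
def pvDiffWitnessOut_all_uniq_combo : (List (List String)) × (List (List String)) := ([], [[]])

-- ===== CLAIM (what is proved, stated in full; the proofs are below) =====
def Claim_unchanged_all_uniq_combo : Prop := ∀ (s : List String) (n : Int), Dom_all_uniq_combo s n → Spec_all_uniq_combo s n (all_uniq_combo s n)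
def Claim_changed_all_uniq_combo : Prop := Dom_all_uniq_combo (pvDiffWitness_all_uniq_combo.1) (pvDiffWitness_all_uniq_combo.2) ∧ D_all_uniq_combo (pvDiffWitness_all_uniq_combo.1) (pvDiffWitness_all_uniq_combo.2) ∧ all_uniq_combo (pvDiffWitness_all_uniq_combo.1) (pvDiffWitness_all_uniq_combo.2) = pvDiffWitnessOut_all_uniq_combo.1 ∧ all_uniq_combo_alt (pvDiffWitness_all_uniq_combo.1) (pvDiffWitness_all_uniq_combo.2) = pvDiffWitnessOut_all_uniq_combo.2 ∧ pvDiffWitnessOut_all_uniq_combo.1 ≠ pvDiffWitnessOut_all_uniq_combo.2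
def Claim_exact_all_uniq_combo : Prop := ∀ (s : List String) (n : Int), Dom_all_uniq_combo s n → D_all_uniq_combo s n → all_uniq_combo s n ≠ all_uniq_combo_alt s n

-- ===== LEMMAS AND PROOFS =====

-- j[-1] of a nonempty list is its last element
theorem pyGetD_neg_one_getLast (j : List Int) (h : j ≠ []) (d : Int) :
    PySem.List.pyGetD j (-1) d = j.getLast h := by
  rcases j with _|⟨a,t⟩
  · simp at h
  · simp [PySem.List.pyGetD, PySem.List.pyGet?, PySem.List.pyIdx?, List.getLast_eq_getElem]
    rfl

-- in a strictly increasing list every element is at most the last one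
theorem le_getLast_of_pairwise_lt (j : List Int) (hp : j.Pairwise (· < ·)) (h : j ≠ []) :
    ∀ a ∈ j, a ≤ j.getLast h := by
  induction j with
  | nil => simp at h
  | cons a t ih =>
    rcases List.pairwise_cons.mp hp with ⟨ha, hpt⟩
    intro b hb0
    rcases List.mem_cons.mp hb0 with rfl | hb
    · rcases t with _|⟨c,t'⟩
      · simp
      · have h2 : (b :: c :: t').getLast (by simp) = (c :: t').getLast (by simp) := by
          simp [List.getLast_cons]
        rw [h2]
        exact le_of_lt (ha _ (List.getLast_mem _))
    · rcases t with _|⟨c,t'⟩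
      · simp at hb
      · have h2 : (a :: c :: t').getLast (by simp) = (c :: t').getLast (by simp) := by
          simp [List.getLast_cons]
        rw [h2]
        exact ih hpt (by simp) b hb

-- the Boolean filter A applies when extending combination j by index `item`
def pA (j : List Int) (item : Int) : Bool :=
  (decide (j ≠ []) && decide (PySem.List.pyGetD j (-1) 0 < item)) || (j.length == 0)

theorem aLevel_eq_flatMap (items : List Int) (old : List (List Int)) :
    aLevel items old
      = old.flatMap (fun j => (items.filter (pA j)).map (fun it => j ++ [it])) := by
  unfold aLevel
  simp only [show ∀ (j : List Int) (item : Int),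
      ((decide (j ≠ []) && decide (PySem.List.pyGetD j (-1) 0 < item)) || (j.length == 0)) = pA j item
    from fun _ _ => rfl]
  rw [PySem.List.foldl_congr_mem old _
    (fun acc j => acc ++ (items.filter (pA j)).map (fun it => j ++ [it])) []
    (fun acc j _ => PySem.List.foldl_append_if (pA j) (fun it => j ++ [it]) items acc)]
  exact PySem.List.foldl_append_eq_flatMap _ old []

-- invariant of A's index combinations: strictly increasing, in range, of the right length
def QA (m : Int) (k : Nat) (j : List Int) : Prop :=
  j.length = k ∧ j.Pairwise (· < ·) ∧ ∀ a ∈ j, 0 ≤ a ∧ a < m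

theorem mem_aLevel_iterate (m : Int) (k : Nat) (j : List Int) :
    j ∈ (aLevel (PySem.List.pyRange 0 m 1))^[k] [[]] ↔ QA m k j := by
  induction k generalizing j with
  | zero =>
    simp only [Function.iterate_zero, id, List.mem_singleton, QA]
    constructor
    · rintro rfl; exact ⟨rfl, by simp, by simp⟩
    · rintro ⟨hlen, _, _⟩; exact List.length_eq_zero_iff.mp hlen
  | succ k ih =>
    rw [Function.iterate_succ_apply', aLevel_eq_flatMap]
    simp only [List.mem_flatMap, List.mem_map, List.mem_filter, PySem.List.mem_pyRange_one, ih]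
    constructor
    · rintro ⟨j0, hQ, it, ⟨⟨hit0, hitm⟩, hpA⟩, rfl⟩
      obtain ⟨hlen, hpw, hbd⟩ := hQ
      simp only [pA, Bool.or_eq_true, Bool.and_eq_true, decide_eq_true_eq, beq_iff_eq] at hpA
      have hall : ∀ a ∈ j0, a < it := by
        rcases hpA with ⟨hne, hlast⟩ | hz
        · intro a ha
          calc a ≤ j0.getLast hne := le_getLast_of_pairwise_lt j0 hpw hne a ha
            _ < it := by rwa [pyGetD_neg_one_getLast j0 hne 0] at hlast
        · intro a ha
          rw [List.length_eq_zero_iff.mp hz] at ha; simp at ha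
      refine ⟨by simp [hlen], ?_, ?_⟩
      · rw [List.pairwise_append]
        exact ⟨hpw, by simp, by simpa using hall⟩
      · intro a ha
        rcases List.mem_append.mp ha with h1 | h1
        · exact hbd a h1
        · simp at h1; subst h1; exact ⟨hit0, hitm⟩
    · rintro ⟨hlen, hpw, hbd⟩
      have hne : j ≠ [] := by
        intro h; subst h; simp at hlen
      refine ⟨j.dropLast, ⟨?_, ?_, ?_⟩, j.getLast hne, ⟨?_, ?_⟩, (List.dropLast_append_getLast hne)⟩
      · simp [List.length_dropLast, hlen]
      · exact hpw.sublist (List.dropLast_sublist j)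
      · exact fun a ha => hbd a ((List.dropLast_sublist j).mem ha)
      · exact hbd _ (List.getLast_mem hne)
      · by_cases hz : j.dropLast = []
        · simp [pA, hz]
        · have hall : ∀ a ∈ j.dropLast, a < j.getLast hne := by
            have hp2 := hpw
            rw [← List.dropLast_append_getLast hne, List.pairwise_append] at hp2
            simpa using hp2.2.2
          simp only [pA, Bool.or_eq_true, Bool.and_eq_true, decide_eq_true_eq, beq_iff_eq]
          left
          refine ⟨hz, ?_⟩
          rw [pyGetD_neg_one_getLast _ hz 0]
          exact hall _ (List.getLast_mem hz)

-- a fold that rebuilds both components from the first is an iterate (when the list is nonempty)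
theorem pairFold_eq_iterate (f : List (List Int) → List (List Int)) :
    ∀ (l : List Int) (a b : List (List Int)),
      l.foldl (fun st _ => (f st.1, f st.1)) (a, b)
        = if l.isEmpty then (a, b) else (f^[l.length] a, f^[l.length] a) := by
  intro l
  induction l with
  | nil => intro a b; simp
  | cons x t ih =>
    intro a b
    simp only [List.foldl_cons, ih (f a) (f a)]
    rcases t with _|⟨y,t'⟩
    · simp
    · simp [Function.iterate_succ_apply]

-- bridge: images of A's index combinations are exactly the length-k sublists
theorem map_index_iff_sublist (t : List String) (k : Nat) (x : List String) :
    (∃ idxs : List Int, QA (t.length : Int) k idxs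
        ∧ x = idxs.map (fun i => PySem.List.pyGetD t i ""))
      ↔ x.Sublist t ∧ x.length = k := by
  constructor
  · rintro ⟨idxs, ⟨hlen, hpw, hbd⟩, rfl⟩
    have hmem : ∀ a ∈ idxs, a ∈ idxs := fun a ha => ha
    have hx : idxs.map (fun i => PySem.List.pyGetD t i "")
        = (idxs.pmap (fun a (h : a ∈ idxs) =>
            (⟨a.toNat, by have := hbd a h; omega⟩ : Fin t.length)) hmem).map
              (fun i => t[i]) := by
      rw [List.map_pmap, ← List.pmap_eq_map (p := fun a => a ∈ idxs) (f := fun i => PySem.List.pyGetD t i "") hmem]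
      apply List.pmap_congr_left
      intro a ha _ _
      have hb := hbd a ha
      rw [PySem.List.pyGetD_of_nonneg t "" hb.1, List.getD_eq_getElem t "" (by omega)]
      simp [Fin.getElem_fin]
    refine ⟨?_, by simp [hlen]⟩
    rw [hx]
    apply List.map_getElem_sublist
    rw [List.pairwise_pmap]
    apply hpw.imp_of_mem
    intro a b ha hb hab h1 h2
    simp only [Fin.mk_lt_mk]
    have := (hbd a ha).1
    omega
  · rintro ⟨hsub, hlen⟩
    obtain ⟨is, hx, hpw⟩ := List.sublist_eq_map_getElem hsub
    refine ⟨is.map (fun i => ((i.1 : Int))), ⟨?_, ?_, ?_⟩, ?_⟩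
    · rw [← hlen, hx]; simp
    · rw [List.pairwise_map]
      apply hpw.imp
      intro a b h
      exact_mod_cast h
    · intro a ha
      simp only [List.mem_map] at ha
      obtain ⟨i, _, rfl⟩ := ha
      refine ⟨by omega, by exact_mod_cast i.2⟩
    · rw [hx, List.map_map]
      apply List.map_congr_left
      intro i _
      simp only [Function.comp]
      rw [PySem.List.pyGetD_natCast, List.getD_eq_getElem _ _ (by exact_mod_cast i.2)]
      simp

theorem sublist_concat_iff (y u : List String) (x : String) :
    y.Sublist (u ++ [x]) ↔ y.Sublist u ∨ ∃ z, y = z ++ [x] ∧ z.Sublist u := by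
  rw [List.sublist_append_iff]
  constructor
  · rintro ⟨l1, l2, rfl, h1, h2⟩
    rcases List.sublist_singleton.mp h2 with rfl | rfl
    · left; simpa using h1
    · right; exact ⟨l1, rfl, h1⟩
  · rintro (h | ⟨z, rfl, hz⟩)
    · exact ⟨y, [], by simp, h, by simp⟩
    · exact ⟨z, [x], rfl, hz, List.Sublist.refl _⟩

-- invariant of B's DP: layer k holds exactly the length-k sublists of the processed prefix
def BP (N : Nat) (u : List String) (acc : List (List (List String))) : Prop :=
  acc.length = N + 1 ∧ ∀ k : Nat, k ≤ N → ∀ y, (y ∈ acc.getD k [] ↔ (y.Sublist u ∧ y.length = k))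

theorem bStep_pres (N : Nat) (u : List String) (x : String) (acc : List (List (List String)))
    (h : BP N u acc) : BP N (u ++ [x]) (bStep x acc) := by
  obtain ⟨hlen, hmem⟩ := h
  have hzlen : (acc.zip acc.tail).length = N := by
    simp [List.length_zip, hlen]
  constructor
  · simp [bStep, hzlen]
  · intro k hk y
    rcases k with _ | k
    · have h0 : (bStep x acc).getD 0 [] = acc.getD 0 [] := by
        simp [bStep, PySem.List.pyGetD_of_nonneg acc ([] : List (List String)) (by norm_num : (0:Int) ≤ 0)]
      rw [h0, hmem 0 (Nat.zero_le _) y]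
      constructor
      · rintro ⟨hs, h0⟩; exact ⟨hs.trans (List.sublist_append_left u [x]), h0⟩
      · rintro ⟨hs, h0⟩
        rw [List.length_eq_zero_iff.mp h0]
        simp
    · have hkN : k < N := hk
      have hget : (bStep x acc).getD (k+1) []
          = acc.getD (k+1) [] ++ (acc.getD k []).map (fun c => c ++ [x]) := by
        have h1 : (k+1) < (bStep x acc).length := by simp [bStep, hzlen]; omega
        rw [List.getD_eq_getElem _ _ h1]
        simp only [bStep]
        rw [List.getElem_append_right (by simp)]
        simp only [List.length_singleton]
        rw [List.getElem_map (h := by simpa [hzlen] using hkN)]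
        rw [List.getElem_zip]
        rw [List.getElem_tail]
        rw [List.getD_eq_getElem _ _ (by omega), List.getD_eq_getElem _ _ (by omega)]
        simp
      rw [hget]
      simp only [List.mem_append, List.mem_map]
      rw [hmem (k+1) (by omega) y]
      constructor
      · rintro (⟨hs, hl⟩ | ⟨z, hz, rfl⟩)
        · exact ⟨hs.trans (List.sublist_append_left u [x]), hl⟩
        · rw [hmem k (by omega) z] at hz
          exact ⟨hz.1.append (List.Sublist.refl [x]), by simp [hz.2]⟩
      · rintro ⟨hs, hl⟩
        rcases (sublist_concat_iff y u x).mp hs with h1 | ⟨z, rfl, hz⟩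
        · exact Or.inl ⟨h1, hl⟩
        · right
          refine ⟨z, ?_, rfl⟩
          rw [hmem k (by omega) z]
          exact ⟨hz, by simp at hl; omega⟩

theorem foldB (N : Nat) : ∀ (v u : List String) (acc : List (List (List String))),
    BP N u acc → BP N (u ++ v) (v.foldl (fun a x => bStep x a) acc) := by
  intro v
  induction v with
  | nil => intro u acc h; simpa using h
  | cons x t ih =>
    intro u acc h
    have h2 := ih (u ++ [x]) (bStep x acc) (bStep_pres N u x acc h)
    simpa using h2

theorem BP_init (N : Nat) : BP N [] ([[[]]] ++ List.replicate N []) := by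
  refine ⟨by simp, ?_⟩
  intro k hk y
  rcases k with _ | k
  · simp only [List.singleton_append, List.getD_cons_zero, List.mem_singleton, List.sublist_nil]
    constructor
    · rintro rfl; exact ⟨rfl, rfl⟩
    · exact fun h => h.1
  · have hg : ([[[]]] ++ List.replicate N ([] : List (List String))).getD (k+1) [] = [] := by
      rcases Nat.lt_or_ge (k+1) (N+1) with h | h
      · rw [List.getD_eq_getElem _ _ (by simpa using h)]
        simp [List.getElem_replicate]
      · rw [List.getD_eq_default _ _ (by simpa using h)]
    rw [hg]
    simp only [List.not_mem_nil, false_iff, not_and]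
    intro hs
    rw [List.sublist_nil.mp hs]
    simp

theorem bStep_fixed (v : List String) :
    v.foldl (fun acc x => bStep x acc) [[[]]] = [[[]]] := by
  induction v with
  | nil => rfl
  | cons x tl ih => simpa [bStep] using ih

-- ===== VERDICT (by name: the statement is the Claim_ definition above) =====
theorem all_uniq_combo_spec : Claim_unchanged_all_uniq_combo := by
  unfold Claim_unchanged_all_uniq_combo
  intro s n _ hnD
  have hn0 : n ≠ 0 := fun h => hnD h
  rcases lt_or_gt_of_ne hn0 with hneg | hpos
  · have hr : PySem.List.pyRange 0 n 1 = [] := PySem.List.pyRange_one_eq_nil (by omega)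
    simp only [all_uniq_combo, all_uniq_combo_alt, hr, List.foldl_nil, if_pos (Or.inl hneg)]
    rfl
  · set t := PySem.List.sorted s (fun x => x) false with ht
    have htlen : t.length = s.length := PySem.List.length_sorted s (fun x => x) false
    set N := n.toNat with hN
    have hlenr : (PySem.List.pyRange 0 n 1).length = N := by
      rw [PySem.List.length_pyRange_one]; omega
    have hemp : (PySem.List.pyRange 0 n 1).isEmpty = false := by
      rw [List.isEmpty_eq_false_iff_exists_mem]
      exact ⟨0, PySem.List.mem_pyRange_one.mpr ⟨le_refl 0, hpos⟩⟩
    rcases Decidable.em ((s.length : Int) < n) with hbig | hsmall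
    · -- n exceeds the number of elements: both sides are []
      simp only [all_uniq_combo, all_uniq_combo_alt, if_pos (Or.inr hbig)]
      rw [pairFold_eq_iterate (aLevel (PySem.List.pyRange 0 (t.length : Int) 1)) (PySem.List.pyRange 0 n 1) [[]] []]
      rw [hemp]
      simp only [Bool.false_eq_true, if_false, hlenr]
      simp only [PySem.List.foldl_append_singleton_eq_map, List.nil_append]
      have hnil : ((aLevel (PySem.List.pyRange 0 (t.length : Int) 1))^[N] [[]]).map
          (List.map (fun x => PySem.List.pyGetD t x "")) = [] := by
        rw [List.map_eq_nil_iff, List.eq_nil_iff_forall_not_mem]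
        intro i hi
        have hQ := (mem_aLevel_iterate (t.length : Int) N i).mp hi
        have hs := (map_index_iff_sublist t N (i.map (fun idx => PySem.List.pyGetD t idx ""))).mp
          ⟨i, hQ, rfl⟩
        have := hs.1.length_le
        rw [hs.2] at this
        omega
      rw [hnil]
      rfl
    · simp only [all_uniq_combo, all_uniq_combo_alt,
        if_neg (show ¬ (n < 0 ∨ (s.length : Int) < n) by omega)]
      rw [pairFold_eq_iterate (aLevel (PySem.List.pyRange 0 (t.length : Int) 1)) (PySem.List.pyRange 0 n 1) [[]] []]
      rw [hemp]
      simp only [Bool.false_eq_true, if_false, hlenr]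
      simp only [PySem.List.foldl_append_singleton_eq_map, List.nil_append]
      have hBP : BP N t ((t.foldl (fun acc x => bStep x acc)) ([[[]]] ++ List.replicate N [])) := by
        have h2 := foldB N t [] ([[[]]] ++ List.replicate N []) (BP_init N)
        simpa using h2
      have hgetB : PySem.List.pyGetD
          (t.foldl (fun acc x => bStep x acc) ([[[]]] ++ List.replicate N []))
          n [] = (t.foldl (fun acc x => bStep x acc) ([[[]]] ++ List.replicate N [])).getD N [] := by
        rw [PySem.List.pyGetD_of_nonneg _ _ (by omega)]
      rw [hgetB]
      have hperm : ∀ (xa xb : List (List String)), (∀ y, y ∈ xa ↔ y ∈ xb) →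
          (PySem.Set.ofList xa).Perm (PySem.Set.ofList xb) := by
        intro xa xb hmem
        apply (List.perm_ext_iff_of_nodup (PySem.Set.nodup_ofList _) (PySem.Set.nodup_ofList _)).mpr
        intro y
        rw [PySem.Set.mem_ofList, PySem.Set.mem_ofList]
        exact hmem y
      have hsorted : ∀ (xa xb : List (List String)), (∀ y, y ∈ xa ↔ y ∈ xb) →
          PySem.List.sorted (PySem.Set.ofList xa) (fun x => x) false
            = PySem.List.sorted (PySem.Set.ofList xb) (fun x => x) false := by
        intro xa xb hmem
        have h2 := PySem.List.sorted_eq_sorted_of_perm _ _ (fun a => a) (fun a b hh => hh) (hperm xa xb hmem)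
        convert h2 using 2
      refine hsorted _ _ ?_
      intro y
      rw [hBP.2 N (le_refl N) y]
      rw [List.mem_map]
      rw [← map_index_iff_sublist t N y]
      constructor
      · rintro ⟨i, hi, rfl⟩
        exact ⟨i, (mem_aLevel_iterate (t.length : Int) N i).mp hi, rfl⟩
      · rintro ⟨idxs, hQ, rfl⟩
        exact ⟨idxs, (mem_aLevel_iterate (t.length : Int) N idxs).mpr hQ, rfl⟩

theorem all_uniq_combo_changed : Claim_changed_all_uniq_combo := by
  unfold Claim_changed_all_uniq_combo; decide

theorem all_uniq_combo_tight : Claim_exact_all_uniq_combo := by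
  unfold Claim_exact_all_uniq_combo
  intro s n _ hD
  unfold D_all_uniq_combo at hD
  subst hD
  have hA : all_uniq_combo s 0 = [] := by
    simp only [all_uniq_combo, PySem.List.pyRange_one_eq_nil (le_refl 0), List.foldl_nil]
    rfl
  have hB : all_uniq_combo_alt s 0 = [[]] := by
    simp only [all_uniq_combo_alt,
      if_neg (show ¬ ((0:Int) < 0 ∨ (s.length : Int) < 0) by omega)]
    simp only [Int.toNat_zero, List.replicate_zero, List.append_nil]
    rw [bStep_fixed]
    rfl
  rw [hA, hB]
  simp
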